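-- pv_equiv track=rewrite | github.com/Anbionchik/Git_brain_lessons | Python_algorythms/Les9/Les9task1.py | get_substr
-- ===== SOURCE A (Python) =====
-- def simple_hash(sbtr):
--     letter = 26
--     index = 0
--     size = 10000
--
--     for i, char in enumerate(sbtr):
--         index += (ord(char) - ord('a') + 1) * letter ** i
--
--     return index % size
--
-- def get_substr(string):
--     len_str = len(string)
--     assert len_str > 1, "В строке должно быть более 1 символа."
--     res_dict = {}
--
--     for i in range(1, len_str):
--         for j in range(len_str - i + 1):
--             sbtr = string[j:j + i]
--             sbtr_hash = simple_hash(sbtr)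
--             if sbtr_hash not in res_dict:
--                 res_dict[sbtr_hash] = sbtr
--     return list(res_dict.values())
-- ===== SOURCE B (Python) =====
-- def get_substr(string):
--     len_str = len(string)
--     assert len_str > 1, "В строке должно быть более 1 символа."
--     res_dict = {}
--     vals = [ord(c) - 96 for c in string]   # ord(c) - ord('a') + 1
--     h = [0] * len_str                      # h[j] = hash of string[j:j+i-1] (rolled over length)
--     p = 1                                  # 26**(i-1) % 10000
--     for i in range(1, len_str):
--         for j in range(len_str - i + 1):
--             h[j] = (h[j] + vals[j + i - 1] * p) % 10000
--             if h[j] not in res_dict: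
--                 res_dict[h[j]] = string[j:j + i]
--         p = (p * 26) % 10000
--     return list(res_dict.values())
-- ===== Notes on version B (the rewrite author's own statement) =====
-- stated objective: faster
-- what changed: Replaced A's per-substring re-hash (O(length) work per substring, O(n^3) total) by a rolling hash that extends each window's hash by one character in O(1), keeping the same (length, start) iteration order and first-insertion dict semantics.
import Mathlib
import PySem

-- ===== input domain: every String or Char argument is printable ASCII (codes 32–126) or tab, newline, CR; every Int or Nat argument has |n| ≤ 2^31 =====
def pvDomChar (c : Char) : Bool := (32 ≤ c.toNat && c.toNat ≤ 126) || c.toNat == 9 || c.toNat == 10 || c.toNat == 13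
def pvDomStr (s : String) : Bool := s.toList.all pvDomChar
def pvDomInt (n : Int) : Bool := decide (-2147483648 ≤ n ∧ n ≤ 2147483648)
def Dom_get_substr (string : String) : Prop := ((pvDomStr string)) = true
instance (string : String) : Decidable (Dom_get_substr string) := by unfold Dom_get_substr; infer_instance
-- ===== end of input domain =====

-- B replaces A's per-substring re-hash (O(length) each, O(n^3) total) by a rolling hash extended by
-- one character in O(1) per window, same iteration order and dict semantics: asymptotically faster.

-- ===== PORT A =====
def simple_hash (sbtr : List Char) : Int :=
  PySem.Int.mod
    ((PySem.List.enumerate sbtr 0).foldl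
      (fun index p => index + ((p.2.toNat : Int) - 97 + 1) * 26 ^ p.1.toNat) 0)
    10000

def pvAstep (l : List Char) (i : Int) (res_dict : PySem.Dict Int String) (j : Int) :
    PySem.Dict Int String :=
  let sbtr := PySem.List.slice l (some j) (some (j + i))
  let sbtr_hash := simple_hash sbtr
  if res_dict.contains sbtr_hash = false then res_dict.insert sbtr_hash (String.ofList sbtr)
  else res_dict

def get_substr (string : String) : List String :=
  ((PySem.List.pyRange 1 (string.toList.length : Int) 1).foldl
    (fun res_dict i =>
      (PySem.List.pyRange 0 ((string.toList.length : Int) - i + 1) 1).foldl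
        (pvAstep string.toList i) res_dict)
    PySem.Dict.empty).values

-- ===== PORT B =====
def pvBstep (l : List Char) (vals : List Int) (p i : Int)
    (st : List Int × PySem.Dict Int String) (j : Int) : List Int × PySem.Dict Int String :=
  let hv := PySem.Int.mod (PySem.List.pyGetD st.1 j 0 + PySem.List.pyGetD vals (j + i - 1) 0 * p) 10000
  (PySem.List.pySetD st.1 j hv,
   if st.2.contains hv = false then
     st.2.insert hv (String.ofList (PySem.List.slice l (some j) (some (j + i))))
   else st.2)

def get_substr_alt (string : String) : List String :=
  (((PySem.List.pyRange 1 (string.toList.length : Int) 1).foldl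
      (fun st i =>
        let st2 := (PySem.List.pyRange 0 ((string.toList.length : Int) - i + 1) 1).foldl
          (pvBstep string.toList (string.toList.map fun c => ((c.toNat : Int) - 96)) st.2.2 i)
          (st.1, st.2.1)
        (st2.1, st2.2, PySem.Int.mod (st.2.2 * 26) 10000))
      (List.replicate string.toList.length 0, PySem.Dict.empty, 1)).2.1).values

-- ===== PRECONDITION & SPEC =====
-- Pre_ excludes strings of length ≤ 1, on which A's assert raises AssertionError.
def Pre_get_substr (string : String) : Prop := 1 < string.toList.length
instance (string : String) : Decidable (Pre_get_substr string) := by unfold Pre_get_substr; infer_instance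
def pvWitness_get_substr : String := "ab"

def Spec_get_substr (string : String) (out : List String) : Prop := out = get_substr_alt string
instance (string : String) (out : List String) : Decidable (Spec_get_substr string out) := by unfold Spec_get_substr; infer_instance

-- ===== CLAIM (what is proved, stated in full; the proofs are below) =====
def Claim_equal_get_substr : Prop := ∀ (string : String), Dom_get_substr string → Pre_get_substr string → Spec_get_substr string (get_substr string)

-- ===== LEMMAS AND PROOFS =====

lemma pv_hash_snoc (s : List Char) (c : Char) :
    simple_hash (s ++ [c]) =
      PySem.Int.mod (simple_hash s + (((c.toNat : Int) - 96) * PySem.Int.mod ((26:Int) ^ s.length) 10000)) 10000 := by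
  unfold simple_hash
  rw [PySem.List.enumerate_append, List.foldl_append]
  simp only [PySem.List.enumerate_cons, PySem.List.enumerate_nil, List.foldl_cons, List.foldl_nil,
    Int.toNat_natCast, zero_add]
  simp only [PySem.Int.mod_eq_emod_of_pos (by norm_num : (0:Int) < 10000)]
  set x := (PySem.List.enumerate s 0).foldl (fun index p => index + ((p.2.toNat : Int) - 97 + 1) * 26 ^ p.1.toNat) 0
  have h1 : x % 10000 ≡ x [ZMOD 10000] := Int.emod_emod_of_dvd x dvd_rfl
  have h2 : (26:Int) ^ s.length % 10000 ≡ (26:Int) ^ s.length [ZMOD 10000] :=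
    Int.emod_emod_of_dvd _ dvd_rfl
  have h3 : ((c.toNat : Int) - 97 + 1) = ((c.toNat : Int) - 96) := by ring
  rw [h3]
  exact (h1.add (h2.mul_left _)).symm

lemma pv_roll (l : List Char) (A I : Nat) (hI : 1 ≤ I) (hAI : A + I ≤ l.length) :
    simple_hash ((l.drop A).take I) =
      PySem.Int.mod (simple_hash ((l.drop A).take (I - 1)) +
        (((l.getD (A + I - 1) 'a').toNat : Int) - 96) * PySem.Int.mod ((26:Int) ^ (I - 1)) 10000) 10000 := by
  have hlen : I - 1 < (l.drop A).length := by simp [List.length_drop]; omega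
  have hsplit : (l.drop A).take I = (l.drop A).take (I - 1) ++ [(l.drop A)[I - 1]] := by
    conv_lhs => rw [show I = (I - 1) + 1 from by omega]
    rw [List.take_add_one, List.getElem?_eq_getElem hlen]
    simp
  have hgd : (l.drop A)[I - 1] = l.getD (A + I - 1) 'a' := by
    rw [List.getElem_drop, List.getD_eq_getElem _ _ (by omega)]
    congr 1; omega
  have hlt : ((l.drop A).take (I - 1)).length = I - 1 := by
    simp [List.length_take, List.length_drop]; omega
  rw [hsplit, pv_hash_snoc, hgd, hlt, mul_comm (((l.getD (A + I - 1) 'a').toNat : Int) - 96)]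

lemma pv_inner (l : List Char) (i : Int) (hi : 1 ≤ i) :
    ∀ (N : Nat) (a : Int) (h : List Int) (d : PySem.Dict Int String),
      (((l.length : Int) - i + 1) - a).toNat = N → 0 ≤ a → h.length = l.length →
      (∀ j : Int, a ≤ j → j < (l.length : Int) - i + 1 →
        PySem.List.pyGetD h j 0 = simple_hash (PySem.List.slice l (some j) (some (j + (i - 1))))) →
      ∃ h' : List Int,
        (PySem.List.pyRange a ((l.length : Int) - i + 1) 1).foldl
            (pvBstep l (l.map fun c => ((c.toNat : Int) - 96)) (PySem.Int.mod ((26:Int) ^ (i-1).toNat) 10000) i) (h, d)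
          = (h', (PySem.List.pyRange a ((l.length : Int) - i + 1) 1).foldl (pvAstep l i) d)
        ∧ h'.length = l.length
        ∧ (∀ j : Int, a ≤ j → j < (l.length : Int) - i + 1 →
            PySem.List.pyGetD h' j 0 = simple_hash (PySem.List.slice l (some j) (some (j + i))))
        ∧ (∀ j : Int, 0 ≤ j → j < (l.length : Int) → ¬ (a ≤ j ∧ j < (l.length : Int) - i + 1) →
            PySem.List.pyGetD h' j 0 = PySem.List.pyGetD h j 0) := by
  intro N
  induction N with
  | zero =>
    intro a h d hN ha hlen hinv
    have hnil : PySem.List.pyRange a ((l.length : Int) - i + 1) 1 = [] :=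
      PySem.List.pyRange_one_eq_nil (by omega)
    refine ⟨h, by rw [hnil]; simp, hlen, ?_, fun j _ _ _ => rfl⟩
    intro j hja hjb; omega
  | succ N ih =>
    intro a h d hN ha hlen hinv
    have hab : a < (l.length : Int) - i + 1 := by omega
    have hin : a + i ≤ (l.length : Int) := by omega
    -- the computed hash at j = a equals simple_hash of the length-i slice
    have hslice : ∀ (k : Int), 0 ≤ k →
        PySem.List.slice l (some a) (some (a + k)) = (l.drop a.toNat).take k.toNat := by
      intro k hk
      rw [PySem.List.slice_toNat _ ha (by omega)]
      congr 1; omega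
    have e1 : ((i:Int) - 1).toNat = i.toNat - 1 := by omega
    have hidx : ((a : Int) + i - 1).toNat = a.toNat + i.toNat - 1 := by omega
    have hb1 : (0:Int) ≤ a + i - 1 := by omega
    have hb2 : a + i - 1 < (((l.map fun c => ((c.toNat : Int) - 96)).length : Int)) := by
      simp only [List.length_map]; omega
    have hva : PySem.List.pyGetD (l.map fun c => ((c.toNat : Int) - 96)) (a + i - 1) 0
        = ((l.getD (a.toNat + i.toNat - 1) 'a').toNat : Int) - 96 := by
      rw [PySem.List.pyGetD_eq_getElem _ _ hb1 hb2, List.getElem_map,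
        List.getD_eq_getElem _ _ (by omega)]
      simp only [hidx]
    have hha : PySem.List.pyGetD h a 0 = simple_hash ((l.drop a.toNat).take (i.toNat - 1)) := by
      rw [hinv a le_rfl hab, hslice (i - 1) (by omega), e1]
    have hv_eq : PySem.Int.mod (PySem.List.pyGetD h a 0 +
          PySem.List.pyGetD (l.map fun c => ((c.toNat : Int) - 96)) (a + i - 1) 0 *
            PySem.Int.mod ((26:Int) ^ (i-1).toNat) 10000) 10000
        = simple_hash (PySem.List.slice l (some a) (some (a + i))) := by
      rw [hva, hha, hslice i (by omega), e1,
        pv_roll l a.toNat i.toNat (by omega) (by omega)]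
    -- unfold one step of each fold
    rw [PySem.List.pyRange_one_cons hab, List.foldl_cons, List.foldl_cons]
    have hBstep : pvBstep l (l.map fun c => ((c.toNat : Int) - 96))
        (PySem.Int.mod ((26:Int) ^ (i-1).toNat) 10000) i (h, d) a
        = (PySem.List.pySetD h a (simple_hash (PySem.List.slice l (some a) (some (a + i)))),
           pvAstep l i d a) := by
      simp only [pvBstep, pvAstep, hv_eq]
    rw [hBstep]
    set hv := simple_hash (PySem.List.slice l (some a) (some (a + i))) with hhv
    have hset : PySem.List.pySetD h a hv = h.set a.toNat hv := PySem.List.pySetD_of_nonneg _ _ ha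
    have hlen1 : (PySem.List.pySetD h a hv).length = l.length := by
      rw [hset, List.length_set]; exact hlen
    obtain ⟨h', heq, hlen', hnew, hold⟩ := ih (a + 1) (PySem.List.pySetD h a hv) (pvAstep l i d a)
      (by omega) (by omega) hlen1
      (by
        intro j hja hjb
        rw [hset, PySem.List.pyGetD_eq_getElem _ _ (by omega) (by rw [List.length_set]; exact_mod_cast by omega),
          List.getElem_set_ne (by omega), ← hinv j (by omega) hjb,
          PySem.List.pyGetD_eq_getElem _ _ (by omega) (by exact_mod_cast by omega)]
      )
    refine ⟨h', heq, hlen', ?_, ?_⟩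
    · intro j hja hjb
      rcases eq_or_lt_of_le hja with hj | hj
      · rw [hold j (by omega) (by omega) (by omega), hset,
          PySem.List.pyGetD_eq_getElem _ _ (by omega) (by rw [List.length_set]; exact_mod_cast by omega)]
        have hje : j.toNat = a.toNat := by omega
        simp only [hje, List.getElem_set_self]
        rw [← hj]
      · exact hnew j (by omega) hjb
    · intro j hj0 hjl hjr
      rw [hold j hj0 hjl (by omega), hset,
        PySem.List.pyGetD_eq_getElem _ _ hj0 (by rw [List.length_set]; exact_mod_cast by omega),
        List.getElem_set_ne (by omega),
        PySem.List.pyGetD_eq_getElem _ _ hj0 (by exact_mod_cast by omega)]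

lemma pv_outer (l : List Char) :
    ∀ (N : Nat) (i : Int) (h : List Int) (d : PySem.Dict Int String),
      ((l.length : Int) - i).toNat = N → 1 ≤ i → h.length = l.length →
      (∀ j : Int, 0 ≤ j → j < (l.length : Int) - i + 1 →
        PySem.List.pyGetD h j 0 = simple_hash (PySem.List.slice l (some j) (some (j + (i - 1))))) →
      ((PySem.List.pyRange i (l.length : Int) 1).foldl
          (fun st i =>
            let st2 := (PySem.List.pyRange 0 ((l.length : Int) - i + 1) 1).foldl
              (pvBstep l (l.map fun c => ((c.toNat : Int) - 96)) st.2.2 i) (st.1, st.2.1)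
            (st2.1, st2.2, PySem.Int.mod (st.2.2 * 26) 10000))
          (h, d, PySem.Int.mod ((26:Int) ^ (i-1).toNat) 10000)).2.1
        = (PySem.List.pyRange i (l.length : Int) 1).foldl
            (fun res_dict i =>
              (PySem.List.pyRange 0 ((l.length : Int) - i + 1) 1).foldl (pvAstep l i) res_dict) d := by
  intro N
  induction N with
  | zero =>
    intro i h d hN hi hlen hinv
    rw [PySem.List.pyRange_one_eq_nil (by omega)]
    simp
  | succ N ih =>
    intro i h d hN hi hlen hinv
    have hib : i < (l.length : Int) := by omega
    rw [PySem.List.pyRange_one_cons hib, List.foldl_cons, List.foldl_cons]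
    obtain ⟨h', heq, hlen', hnew, _⟩ :=
      pv_inner l i hi (((l.length : Int) - i + 1) - 0).toNat 0 h d rfl le_rfl hlen
        (fun j hj0 hjb => hinv j hj0 hjb)
    simp only [heq]
    have hp : PySem.Int.mod (PySem.Int.mod ((26:Int) ^ (i-1).toNat) 10000 * 26) 10000
        = PySem.Int.mod ((26:Int) ^ (i+1-1).toNat) 10000 := by
      rw [PySem.Int.mod_eq_emod_of_pos (by norm_num), PySem.Int.mod_eq_emod_of_pos (by norm_num),
        PySem.Int.mod_eq_emod_of_pos (by norm_num)]
      have h26 : (26:Int) % 10000 = 26 := by decide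
      rw [show ((i:Int)+1-1).toNat = (i-1).toNat + 1 from by omega, pow_succ,
        Int.mul_emod ((26:Int) ^ (i-1).toNat) 26, h26]
    rw [hp]
    exact ih (i + 1) h' (List.foldl (pvAstep l i) d (PySem.List.pyRange 0 ((l.length : Int) - i + 1)))
      (by omega) (by omega) hlen'
      (fun j hj0 hjb => by
        have e : (i:Int) + 1 - 1 = i := by ring
        rw [e]
        exact hnew j hj0 (by omega))

-- ===== VERDICT (by name: the statement is the Claim_ definition above) =====
theorem get_substr_spec : Claim_equal_get_substr := by
  intro string _ _
  unfold Spec_get_substr get_substr get_substr_alt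
  have hinv0 : ∀ j : Int, 0 ≤ j → j < (string.toList.length : Int) - 1 + 1 →
      PySem.List.pyGetD (List.replicate string.toList.length (0:Int)) j 0
        = simple_hash (PySem.List.slice string.toList (some j) (some (j + ((1:Int) - 1)))) := by
    intro j hj0 hjb
    have e : (1:Int) - 1 = 0 := by ring
    rw [e, add_zero, PySem.List.slice_toNat _ hj0 hj0,
      PySem.List.pyGetD_eq_getElem _ _ hj0 (by simp only [List.length_replicate]; omega)]
    simp
    rfl
  have hmain := pv_outer string.toList ((string.toList.length : Int) - 1).toNat 1
    (List.replicate string.toList.length 0) PySem.Dict.empty rfl le_rfl (by simp) hinv0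
  have e1 : PySem.Int.mod ((26:Int) ^ (((1:Int)) - 1).toNat) 10000 = 1 := by decide
  rw [e1] at hmain
  exact (congrArg PySem.Dict.values hmain).symm
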